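-- pv_equiv track=rewrite | github.com/Saulo8732/AutomatosExemplo1 | exercicio1.py | automato2
-- ===== SOURCE A (Python) =====
-- def automato1(letra):
--     alfabeto = ['+', '-', '*', '/', 'imprima', 'recebe', 'entrada']
--     if letra.startswith('@'):
--         return True
--     elif(letra.isnumeric()):
--         return True
--     elif(letra in alfabeto):
--         return True
--     else:
--         return False
--
-- def automato2(sentenca):
--     letras  = sentenca.split()
--     ultimaletra = ''
--     for letra in letras:
--         if(letra == ultimaletra):
--             return False
--         else:
--             ultimaletra = letra
--             if(automato1(letra)):
--                 continue
--             else: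
--                 return False
--     return True
-- ===== SOURCE B (Python) =====
-- def automato1(letra):
--     alfabeto = ['+', '-', '*', '/', 'imprima', 'recebe', 'entrada']
--     if letra.startswith('@'):
--         return True
--     elif(letra.isnumeric()):
--         return True
--     elif(letra in alfabeto):
--         return True
--     else:
--         return False
--
-- def automato2(sentenca):
--     letras = sentenca.split()
--     return (all(a != b for a, b in zip(letras, letras[1:]))
--             and all(automato1(t) for t in letras))
-- ===== Notes on version B (the rewrite author's own statement) =====
-- stated objective: simpler
-- what changed: Replaces the fused loop that tracks the previous token (ultimaletra) and early-returns with two separate declarative passes: an adjacent-pair zip scan for consecutive duplicates and an all() scan for token validity.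
import Mathlib
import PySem

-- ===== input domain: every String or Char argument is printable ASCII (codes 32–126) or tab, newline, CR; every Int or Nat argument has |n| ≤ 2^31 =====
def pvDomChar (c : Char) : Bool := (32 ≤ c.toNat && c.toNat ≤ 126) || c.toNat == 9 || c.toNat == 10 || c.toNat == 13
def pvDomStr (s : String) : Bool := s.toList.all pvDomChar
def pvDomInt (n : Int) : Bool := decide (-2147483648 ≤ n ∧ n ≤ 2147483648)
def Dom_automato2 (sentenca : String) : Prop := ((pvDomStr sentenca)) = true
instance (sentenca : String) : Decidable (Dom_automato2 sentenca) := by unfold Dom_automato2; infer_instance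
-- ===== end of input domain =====

-- B replaces A's fused loop (tracking the previous token) by two separate passes:
-- an adjacent-pair scan for consecutive duplicates and an all-tokens validity scan (objective: simpler).

-- ===== PORT A =====
-- letra.isnumeric() is ported as strIsdigit: on the printable-ASCII domain the two coincide (digits '0'–'9').
def automato1 (letra : String) : Bool :=
  let alfabeto : List String := ["+", "-", "*", "/", "imprima", "recebe", "entrada"]
  if PySem.Str.startswith letra "@" then true
  else if PySem.Str.strIsdigit letra then true
  else if letra ∈ alfabeto then true
  else false

-- the for-loop with early returns, as structural recursion over the token list with the `ultimaletra` accumulator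
def automato2Loop (ultimaletra : String) : List String → Bool
  | [] => true
  | letra :: rest =>
      if letra == ultimaletra then false
      else if automato1 letra then automato2Loop letra rest
      else false

def automato2 (sentenca : String) : Bool :=
  automato2Loop "" (PySem.Str.split₀ sentenca)

-- ===== PORT B =====
def automato2_alt (sentenca : String) : Bool :=
  let letras := PySem.Str.split₀ sentenca
  (letras.zip (PySem.List.slice letras (some 1) none)).all (fun ab => ab.1 != ab.2)
    && letras.all automato1

-- ===== PRECONDITION & SPEC =====
def Spec_automato2 (sentenca : String) (out : Bool) : Prop := out = automato2_alt sentenca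
instance (sentenca : String) (out : Bool) : Decidable (Spec_automato2 sentenca out) := by unfold Spec_automato2; infer_instance

-- ===== CLAIM (what is proved, stated in full; the proofs are below) =====
def Claim_equal_automato2 : Prop := ∀ (sentenca : String), Dom_automato2 sentenca → Spec_automato2 sentenca (automato2 sentenca)

-- ===== LEMMAS AND PROOFS =====

-- B's pair scan and token scan, fused shape for the induction
lemma automato2Loop_eq (ts : List String) : ∀ prev : String,
    automato2Loop prev ts =
      ((match ts with | [] => true | t :: _ => t != prev)
        && (ts.zip ts.tail).all (fun ab => ab.1 != ab.2)
        && ts.all automato1) := by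
  induction ts with
  | nil => intro prev; rfl
  | cons t rest ih =>
      intro prev
      simp only [automato2Loop, ih t]
      cases rest <;>
        cases hb : (t == prev) <;> cases ha : automato1 t <;>
          simp [ha, hb, bne, Bool.beq_comm, Bool.and_assoc, Bool.and_comm, Bool.and_left_comm]

lemma head_ne_empty_or_invalid (ts : List String) :
    ((match ts with | [] => true | t :: _ => t != "") && ts.all automato1)
      = ts.all automato1 := by
  cases ts with
  | nil => rfl
  | cons t rest =>
      by_cases h : t = ""
      · subst h
        have h0 : automato1 "" = false := by decide
        simp [h0]
      · simp [bne, h]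

-- ===== VERDICT (by name: the statement is the Claim_ definition above) =====
theorem automato2_spec : Claim_equal_automato2 := by
  intro s _
  unfold Spec_automato2 automato2 automato2_alt
  simp only [PySem.List.slice_from_one, automato2Loop_eq]
  rw [Bool.and_assoc, Bool.and_comm (((PySem.Str.split₀ s).zip (PySem.Str.split₀ s).tail).all _),
    ← Bool.and_assoc, head_ne_empty_or_invalid, Bool.and_comm]
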